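-- pv_equiv track=rewrite | github.com/mathalves23/agroadb-app | backend/app/core/two_factor.py | verify_backup_code
-- ===== SOURCE A (Python) =====
-- from typing import Optional
--
-- def verify_backup_code(stored_codes: str, provided_code: str) -> tuple[bool, Optional[str]]:
--     """
--     Verifica código de backup
--
--     Args:
--         stored_codes: Códigos armazenados (separados por vírgula)
--         provided_code: Código fornecido pelo usuário
--
--     Returns:
--         Tupla (is_valid, remaining_codes)
--     """
--     if not stored_codes:
--         return False, None
--
--     codes = [c.strip() for c in stored_codes.split(",")]
--     provided_clean = provided_code.strip().upper()
--
--     if provided_clean in codes: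
--         # Remover código usado
--         codes.remove(provided_clean)
--         remaining = ",".join(codes) if codes else None
--         return True, remaining
--
--     return False, stored_codes
-- ===== SOURCE B (Python) =====
-- def verify_backup_code(stored_codes: str, provided_code: str):
--     if not stored_codes:
--         return False, None
--     provided_clean = provided_code.strip().upper()
--     found = False
--     remaining = []
--     for c in stored_codes.split(","):
--         c = c.strip()
--         if not found and c == provided_clean:
--             found = True
--         else:
--             remaining.append(c)
--     if found:
--         return True, ",".join(remaining) if remaining else None
--     return False, stored_codes
-- ===== Notes on version B (the rewrite author's own statement) =====
-- stated objective: alternative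
-- what changed: Replaces the membership-test + list.remove + rejoin triple scan with a single pass over the split codes that keeps a found flag and accumulates the surviving codes, stripping each element on the fly.
import Mathlib
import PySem

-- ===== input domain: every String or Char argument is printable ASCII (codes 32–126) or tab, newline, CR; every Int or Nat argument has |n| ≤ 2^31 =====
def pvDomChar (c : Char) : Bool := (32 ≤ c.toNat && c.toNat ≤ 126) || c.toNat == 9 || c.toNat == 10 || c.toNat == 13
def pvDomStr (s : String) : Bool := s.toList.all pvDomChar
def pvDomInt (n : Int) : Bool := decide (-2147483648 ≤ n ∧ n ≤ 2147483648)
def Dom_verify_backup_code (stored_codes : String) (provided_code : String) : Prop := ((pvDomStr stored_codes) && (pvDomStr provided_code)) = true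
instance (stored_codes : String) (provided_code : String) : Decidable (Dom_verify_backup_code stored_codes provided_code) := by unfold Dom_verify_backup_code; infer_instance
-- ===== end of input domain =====

-- B replaces A's membership-test + remove + rejoin triple scan by a single pass with a found flag (alternative decomposition, same cost).


-- ===== PORT A =====
def verify_backup_code (stored_codes : String) (provided_code : String) : Bool × Option String :=
  if stored_codes = "" then (false, none)
  else
    let codes := (((PySem.Str.split? stored_codes ",").getD [])).map PySem.Str.strip
    let provided_clean := PySem.Str.upper (PySem.Str.strip provided_code)
    if provided_clean ∈ codes then
      let codes' := (PySem.List.remove? codes provided_clean).getD codes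
      (true, if codes' = [] then none else some (PySem.Str.join "," codes'))
    else (false, some stored_codes)

-- ===== PORT B =====
-- the single pass of Source B: strip each element, skip the first match, keep the rest
def vbLoop (pc : String) (found : Bool) (rem : List String) : List String → Bool × List String
  | [] => (found, rem)
  | c :: cs =>
    let c' := PySem.Str.strip c
    if !found && c' == pc then vbLoop pc true rem cs
    else vbLoop pc found (rem ++ [c']) cs

def verify_backup_code_alt (stored_codes : String) (provided_code : String) : Bool × Option String :=
  if stored_codes = "" then (false, none)
  else
    let provided_clean := PySem.Str.upper (PySem.Str.strip provided_code)
    let r := vbLoop provided_clean false [] (((PySem.Str.split? stored_codes ",").getD []))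
    if r.1 then (true, if r.2 = [] then none else some (PySem.Str.join "," r.2))
    else (false, some stored_codes)

-- ===== PRECONDITION & SPEC =====
def Spec_verify_backup_code (stored_codes : String) (provided_code : String) (out : Bool × Option String) : Prop := out = verify_backup_code_alt stored_codes provided_code
instance (stored_codes : String) (provided_code : String) (out : Bool × Option String) : Decidable (Spec_verify_backup_code stored_codes provided_code out) := by unfold Spec_verify_backup_code; infer_instance

-- ===== CLAIM (what is proved, stated in full; the proofs are below) =====
def Claim_equal_verify_backup_code : Prop := ∀ (stored_codes : String) (provided_code : String), Dom_verify_backup_code stored_codes provided_code → Spec_verify_backup_code stored_codes provided_code (verify_backup_code stored_codes provided_code)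

-- ===== LEMMAS AND PROOFS =====
theorem vbLoop_true (pc : String) (cs : List String) : ∀ rem,
    vbLoop pc true rem cs = (true, rem ++ cs.map PySem.Str.strip) := by
  induction cs with
  | nil => intro rem; simp [vbLoop]
  | cons c cs ih => intro rem; simp [vbLoop, ih, List.append_assoc]

theorem vbLoop_false (pc : String) (cs : List String) : ∀ rem,
    vbLoop pc false rem cs =
      if pc ∈ cs.map PySem.Str.strip then (true, rem ++ (cs.map PySem.Str.strip).erase pc)
      else (false, rem ++ cs.map PySem.Str.strip) := by
  induction cs with
  | nil => intro rem; simp [vbLoop]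
  | cons c cs ih =>
    intro rem
    by_cases h : PySem.Str.strip c = pc
    · simp [vbLoop, h, vbLoop_true, List.erase_cons_head]
    · have hne : ¬(PySem.Str.strip c == pc) = true := by simp [h]
      have hb : (PySem.Str.strip c == pc) = false := by simp [h]
      simp only [vbLoop, hb, Bool.not_false, Bool.true_and, if_false]
      rw [ih, List.map_cons, List.erase_cons_tail hne]
      simp [List.mem_cons, Ne.symm h, List.append_assoc]

theorem verify_backup_code_eq (stored_codes provided_code : String) :
    verify_backup_code stored_codes provided_code = verify_backup_code_alt stored_codes provided_code := by
  unfold verify_backup_code verify_backup_code_alt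
  by_cases hs : stored_codes = ""
  · simp [hs]
  · simp only [hs, if_false]
    rw [vbLoop_false]
    by_cases hmem : PySem.Str.upper (PySem.Str.strip provided_code) ∈
        ((PySem.Str.split? stored_codes ",").getD []).map PySem.Str.strip
    · rw [if_pos hmem, if_pos hmem, PySem.List.remove?_eq_some_erase _ _ hmem]
      simp
    · rw [if_neg hmem, if_neg hmem]
      simp

-- ===== VERDICT (by name: the statement is the Claim_ definition above) =====
theorem verify_backup_code_spec : Claim_equal_verify_backup_code := by
  intro s p _
  unfold Spec_verify_backup_code
  exact verify_backup_code_eq s p
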